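-- pv_equiv track=rewrite | github.com/ahastudio/CodingLife | 20180913/python/harry_potter_test.py | selections
-- ===== SOURCE A (Python) =====
-- def selections(books):
--     def step(xs, index):
--         if index == len(books):
--             return [xs]
--         result = []
--         for i in range(books[index] == 0 and 1 or 2):
--             result += step(xs + [i], index + 1)
--         return result
--     return {tuple(xs) for xs in step([], 0) if sum(xs) != 0}
-- ===== SOURCE B (Python) =====
-- def selections(books):
--     acc = [()]
--     for b in books:
--         opts = (0,) if b == 0 else (0, 1)
--         acc = [t + (i,) for t in acc for i in opts]
--     return {t for t in acc if sum(t) != 0}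
-- ===== Notes on version B (the rewrite author's own statement) =====
-- stated objective: idiomatic
-- what changed: Replaced A's recursive step(xs, index) with indexed access and per-call result accumulation by a single iterative left fold over the books that extends all partial selection tuples position by position (an iterative cartesian product of per-book option lists).
import Mathlib
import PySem

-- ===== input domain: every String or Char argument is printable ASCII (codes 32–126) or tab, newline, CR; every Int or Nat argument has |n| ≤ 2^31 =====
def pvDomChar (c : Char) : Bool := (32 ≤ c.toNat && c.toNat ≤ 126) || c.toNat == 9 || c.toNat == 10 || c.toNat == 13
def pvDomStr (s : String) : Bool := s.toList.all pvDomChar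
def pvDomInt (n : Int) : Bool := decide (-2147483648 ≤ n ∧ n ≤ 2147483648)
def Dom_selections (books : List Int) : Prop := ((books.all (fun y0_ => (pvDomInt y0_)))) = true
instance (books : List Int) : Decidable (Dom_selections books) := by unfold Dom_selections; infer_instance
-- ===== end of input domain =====

-- B replaces A's recursive step/accumulator with a single left-to-right fold extending partial tuples (idiomatic iterative cartesian product); same cost.

-- ===== PORT A =====
-- recursion on index; the `else []` branch is unreachable (index ≤ books.length always) and only makes the recursion total
def stepA (books : List Int) (xs : List Int) (index : Nat) : List (List Int) :=
  if index = books.length then [xs]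
  else if h : index < books.length then
    -- range(books[index] == 0 and 1 or 2)
    (List.range (if books[index] = 0 then 1 else 2)).foldl
      (fun result (i : Nat) => result ++ stepA books (xs ++ [(i : Int)]) (index + 1)) []
  else []
termination_by books.length - index

def selections (books : List Int) : List (List Int) :=
  PySem.Set.ofList ((stepA books [] 0).filter (fun xs => !(xs.sum == 0)))

-- ===== PORT B =====
def selections_alt (books : List Int) : List (List Int) :=
  let acc := books.foldl
    (fun acc b => acc.flatMap (fun t => (if b = 0 then [(0 : Int)] else [0, 1]).map (fun i => t ++ [i])))
    [[]]
  PySem.Set.ofList (acc.filter (fun t => !(t.sum == 0)))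

-- ===== PRECONDITION & SPEC =====
def Spec_selections (books : List Int) (out : List (List Int)) : Prop := out = selections_alt books
instance (books : List Int) (out : List (List Int)) : Decidable (Spec_selections books out) := by unfold Spec_selections; infer_instance

-- ===== CLAIM (what is proved, stated in full; the proofs are below) =====
def Claim_equal_selections : Prop := ∀ (books : List Int), Dom_selections books → Spec_selections books (selections books)

-- ===== LEMMAS AND PROOFS =====

-- B's fold step
def stepB (b : Int) (acc : List (List Int)) : List (List Int) :=
  acc.flatMap (fun t => (if b = 0 then [(0 : Int)] else [0, 1]).map (fun i => t ++ [i]))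

theorem foldl_stepB_append (bs : List Int) (a₁ a₂ : List (List Int)) :
    bs.foldl (fun acc b => stepB b acc) (a₁ ++ a₂)
      = bs.foldl (fun acc b => stepB b acc) a₁ ++ bs.foldl (fun acc b => stepB b acc) a₂ := by
  induction bs generalizing a₁ a₂ with
  | nil => simp
  | cons b bs ih =>
    simp only [List.foldl_cons]
    rw [show stepB b (a₁ ++ a₂) = stepB b a₁ ++ stepB b a₂ from by
      simp [stepB, List.flatMap_append]]
    exact ih _ _

theorem stepA_eq_fold (books : List Int) (index : Nat) (xs : List Int) (hle : index ≤ books.length) :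
    stepA books xs index = (books.drop index).foldl (fun acc b => stepB b acc) [xs] := by
  rcases eq_or_lt_of_le hle with heq | hlt
  · rw [stepA, if_pos heq, List.drop_of_length_le (le_of_eq heq.symm)]; simp
  · have hdrop : books.drop index = books[index] :: books.drop (index + 1) :=
      List.drop_eq_getElem_cons hlt
    rw [stepA, if_neg (Nat.ne_of_lt hlt), dif_pos hlt, hdrop]
    have ih0 := stepA_eq_fold books (index + 1) (xs ++ [(0 : Int)]) hlt
    simp only [List.foldl_cons]
    by_cases hb : books[index] = 0
    · rw [if_pos hb, show List.range 1 = [0] from rfl]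
      simp only [List.foldl_cons, List.foldl_nil, List.nil_append, Nat.cast_zero, ih0]
      rw [show stepB books[index] [xs] = [xs ++ [(0 : Int)]] from by simp [stepB, hb]]
    · have ih1 := stepA_eq_fold books (index + 1) (xs ++ [(1 : Int)]) hlt
      rw [if_neg hb, show List.range 2 = [0, 1] from by decide]
      simp only [List.foldl_cons, List.foldl_nil, List.nil_append, Nat.cast_zero,
        Nat.cast_one, ih0, ih1]
      rw [show stepB books[index] [xs] = [xs ++ [(0 : Int)]] ++ [xs ++ [(1 : Int)]] from by
        simp [stepB, hb], foldl_stepB_append]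
termination_by books.length - index

-- ===== VERDICT (by name: the statement is the Claim_ definition above) =====
theorem selections_spec : Claim_equal_selections := by
  intro books _
  unfold Spec_selections selections selections_alt
  rw [stepA_eq_fold books 0 [] (Nat.zero_le _)]
  rfl
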